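-- pv_equiv track=rewrite | github.com/hirosuzuki/procon | atcoder/arc096/d0.py | solve
-- ===== SOURCE A (Python) =====
-- def solve(C, xv):
--
--     N = len(xv)
--
--     def mk(xv):
--         ts = []
--         t = 0
--         for i, _ in enumerate(xv):
--             x, v = _
--             t += v
--             ts.append((t - x, x, i))
--         return ts
--
--     ts1 = mk(xv)
--     ts2 = mk([(C - x, v) for x, v in xv[::-1]])
--
--     result = 0
--
--     for i in range(N):
--         r0 = ts1[i][0]
--         result = max(result, r0)
--         for j in range(N - i - 1):
--             r = r0 + ts2[j][0] - ts2[j][1]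
--             result = max(result, r)
--
--     for i in range(N):
--         r0 = ts2[i][0]
--         result = max(result, r0)
--         for j in range(N - i - 1):
--             r = r0 + ts1[j][0] - ts1[j][1]
--             result = max(result, r)
--
--     return result
-- ===== SOURCE B (Python) =====
-- def solve(C, xv):
--     # O(N) via prefix maxima instead of the O(N^2) double loop
--     N = len(xv)
--
--     def scan(pairs):
--         t = 0
--         a = []
--         d = []
--         for x, v in pairs:
--             t += v
--             a.append(t - x)
--             d.append(t - 2 * x)
--         return a, d
--
--     a1, d1 = scan(xv)
--     a2, d2 = scan([(C - x, v) for x, v in reversed(xv)])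
--
--     def best(a, d):
--         res = 0
--         m = 0  # m = max(0, d[0], ..., d[k-1])
--         for k in range(N):
--             res = max(res, a[N - 1 - k] + m)
--             m = max(m, d[k])
--         return res
--
--     return max(best(a1, d2), best(a2, d1))
-- ===== Notes on version B (the rewrite author's own statement) =====
-- stated objective: faster
-- what changed: Replaced the O(N^2) double loops by one O(N) pass per direction that keeps a running prefix maximum of (t-2x), so each outer index is handled in O(1).
import Mathlib
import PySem

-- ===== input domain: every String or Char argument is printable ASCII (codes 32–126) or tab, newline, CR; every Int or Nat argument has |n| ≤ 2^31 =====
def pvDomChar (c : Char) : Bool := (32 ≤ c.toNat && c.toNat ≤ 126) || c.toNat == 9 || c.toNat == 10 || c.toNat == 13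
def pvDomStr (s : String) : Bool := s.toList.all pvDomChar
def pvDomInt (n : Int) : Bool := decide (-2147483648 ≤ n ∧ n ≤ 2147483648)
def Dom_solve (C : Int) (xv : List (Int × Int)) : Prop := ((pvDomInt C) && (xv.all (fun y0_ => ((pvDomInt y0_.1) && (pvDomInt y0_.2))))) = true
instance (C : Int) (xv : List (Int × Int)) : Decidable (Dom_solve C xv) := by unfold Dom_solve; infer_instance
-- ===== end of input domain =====

-- B replaces A's O(N^2) double loops by one linear pass per direction that keeps a
-- running prefix maximum of (t - 2x); same return value, asymptotically faster.


-- ===== PORT A =====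
-- helper mk: running sum t of v, list of triples (t - x, x, i)
def mkA (xv : List (Int × Int)) : List (Int × Int × Int) :=
  ((xv.zipIdx).foldl
    (fun (st : List (Int × Int × Int) × Int) (p : (Int × Int) × Nat) =>
      let t := st.2 + p.1.2
      (st.1 ++ [(t - p.1.1, p.1.1, (p.2 : Int))], t))
    ([], 0)).1

-- indices i, j are always < length of the indexed list, so getD's default is never used
def solve (C : Int) (xv : List (Int × Int)) : Int :=
  let N := xv.length
  let ts1 := mkA xv
  let ts2 := mkA ((xv.reverse).map (fun p => (C - p.1, p.2)))
  let result : Int := 0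
  let result := (List.range N).foldl
    (fun result i =>
      let r0 := (ts1.getD i (0, 0, 0)).1
      let result := max result r0
      (List.range (N - i - 1)).foldl
        (fun result j =>
          max result (r0 + (ts2.getD j (0, 0, 0)).1 - (ts2.getD j (0, 0, 0)).2.1))
        result)
    result
  let result := (List.range N).foldl
    (fun result i =>
      let r0 := (ts2.getD i (0, 0, 0)).1
      let result := max result r0
      (List.range (N - i - 1)).foldl
        (fun result j =>
          max result (r0 + (ts1.getD j (0, 0, 0)).1 - (ts1.getD j (0, 0, 0)).2.1))
        result)
    result
  result

-- ===== PORT B =====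
-- scan: one pass producing the a-list (t - x) and the d-list (t - 2x)
def scanB (pairs : List (Int × Int)) : List Int × List Int :=
  let st := pairs.foldl
    (fun (st : Int × List Int × List Int) (p : Int × Int) =>
      let t := st.1 + p.2
      (t, st.2.1 ++ [t - p.1], st.2.2 ++ [t - 2 * p.1]))
    (0, [], [])
  (st.2.1, st.2.2)

-- best: single loop, st.2 is the running prefix maximum max(0, d[0..k-1])
def bestB (N : Nat) (a d : List Int) : Int :=
  ((List.range N).foldl
    (fun (st : Int × Int) k =>
      (max st.1 (a.getD (N - 1 - k) 0 + st.2), max st.2 (d.getD k 0)))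
    (0, 0)).1

def solve_alt (C : Int) (xv : List (Int × Int)) : Int :=
  let N := xv.length
  let s1 := scanB xv
  let s2 := scanB ((xv.reverse).map (fun p => (C - p.1, p.2)))
  max (bestB N s1.1 s2.2) (bestB N s2.1 s1.2)

-- ===== PRECONDITION & SPEC =====
def Spec_solve (C : Int) (xv : List (Int × Int)) (out : Int) : Prop := out = solve_alt C xv
instance (C : Int) (xv : List (Int × Int)) (out : Int) : Decidable (Spec_solve C xv out) := by unfold Spec_solve; infer_instance

-- ===== CLAIM (what is proved, stated in full; the proofs are below) =====
def Claim_equal_solve : Prop := ∀ (C : Int) (xv : List (Int × Int)), Dom_solve C xv → Spec_solve C xv (solve C xv)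

-- ===== LEMMAS AND PROOFS =====

-- prefix maximum max(0, g 0, …, g (k-1))
def mz (g : Nat → Int) (k : Nat) : Int :=
  (List.range k).foldl (fun m j => max m (g j)) 0

theorem mz_succ (g : Nat → Int) (k : Nat) :
    mz g (k + 1) = max (mz g k) (g k) := by
  simp [mz, List.range_succ]

-- A's inner loop collapses to the prefix maximum
theorem inner_eq (g : Nat → Int) (k : Nat) :
    ∀ (acc r0 : Int),
      (List.range k).foldl (fun res j => max res (r0 + g j)) (max acc r0)
        = max acc (r0 + mz g k) := by
  induction k with
  | zero => intro acc r0; simp [mz]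
  | succ n ih =>
      intro acc r0
      rw [List.range_succ, List.foldl_append, ih, mz_succ]
      simp only [List.foldl_cons, List.foldl_nil]
      omega

-- pulling a max out of the initial accumulator
theorem foldl_max_init_max (F : Nat → Int) :
    ∀ (l : List Nat) (acc x : Int),
      l.foldl (fun r y => max r (F y)) (max acc x)
        = max (l.foldl (fun r y => max r (F y)) acc) x := by
  intro l
  induction l with
  | nil => intro acc x; rfl
  | cons h t ih =>
      intro acc x
      simp only [List.foldl_cons]
      rw [show max (max acc x) (F h) = max (max acc (F h)) x from by omega, ih]

-- a foldl of max over a reversed list is the same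
theorem foldl_max_reverse (F : Nat → Int) :
    ∀ (l : List Nat) (acc : Int),
      l.reverse.foldl (fun r y => max r (F y)) acc
        = l.foldl (fun r y => max r (F y)) acc := by
  intro l
  induction l with
  | nil => intro acc; rfl
  | cons h t ih =>
      intro acc
      rw [List.reverse_cons, List.foldl_append, ih]
      simp only [List.foldl_cons, List.foldl_nil]
      rw [foldl_max_init_max]

-- restarting a max-fold from 0 instead of a nonnegative accumulator
theorem foldl_max_init_zero (F : Nat → Int) :
    ∀ (l : List Nat) (acc : Int), 0 ≤ acc →
      l.foldl (fun r y => max r (F y)) acc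
        = max acc (l.foldl (fun r y => max r (F y)) 0) := by
  intro l
  induction l with
  | nil => intro acc h; simp; omega
  | cons h t ih =>
      intro acc hacc
      simp only [List.foldl_cons]
      rw [ih (max acc (F h)) (by omega), ih (max 0 (F h)) (by omega)]
      omega

theorem foldl_max_nonneg (F : Nat → Int) (l : List Nat) (acc : Int) (h : 0 ≤ acc) :
    0 ≤ l.foldl (fun r y => max r (F y)) acc := by
  induction l generalizing acc with
  | nil => exact h
  | cons x t ih => exact ih (max acc (F x)) (by omega)

-- A's double loop over range N equals the single prefix-maximum pass
theorem outer_eq (f g : Nat → Int) (N : Nat) (acc : Int) :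
    (List.range N).foldl
        (fun res i =>
          (List.range (N - i - 1)).foldl
            (fun res j => max res (f i + g j)) (max res (f i))) acc
      = (List.range N).foldl (fun res i => max res (f i + mz g (N - 1 - i))) acc := by
  have hfun : (fun (res : Int) (i : Nat) =>
      (List.range (N - i - 1)).foldl
        (fun res j => max res (f i + g j)) (max res (f i)))
      = fun res i => max res (f i + mz g (N - 1 - i)) := by
    funext res i
    rw [show N - 1 - i = N - i - 1 from by omega]
    exact inner_eq g (N - i - 1) res (f i)
  rw [hfun]

-- B's single pass computes the same value as the prefix-maximum form, reversed
theorem bestB_fold_eq (f g : Nat → Int) :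
    ∀ (n : Nat),
      (List.range n).foldl
          (fun (st : Int × Int) k => (max st.1 (f k + st.2), max st.2 (g k))) (0, 0)
        = ((List.range n).foldl (fun r k => max r (f k + mz g k)) 0, mz g n) := by
  intro n
  induction n with
  | zero => simp [mz]
  | succ m ih =>
      rw [List.range_succ, List.foldl_append, List.foldl_append, ih]
      simp only [List.foldl_cons, List.foldl_nil]
      rw [mz_succ]

-- reindexing k ↦ N-1-k over range N is a reversal
theorem foldl_max_reindex (H : Nat → Int) (N : Nat) (acc : Int) :
    (List.range N).foldl (fun r k => max r (H (N - 1 - k))) acc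
      = (List.range N).foldl (fun r i => max r (H i)) acc := by
  have h1 : (List.range N).foldl (fun r k => max r (H (N - 1 - k))) acc
      = ((List.range N).map (fun k => N - 1 - k)).foldl (fun r y => max r (H y)) acc := by
    rw [List.foldl_map]
  have h2 : (List.range N).map (fun k => N - 1 - k) = (List.range N).reverse := by
    rw [List.range_eq_range', List.reverse_range']
    simp [List.range_eq_range']
  rw [h1, h2, foldl_max_reverse]

-- B's bestB equals A's simplified outer loop (from 0)
theorem bestB_eq (f g : Nat → Int) (N : Nat) :
    ((List.range N).foldl
        (fun (st : Int × Int) k => (max st.1 (f (N - 1 - k) + st.2), max st.2 (g k))) (0, 0)).1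
      = (List.range N).foldl (fun res i => max res (f i + mz g (N - 1 - i))) 0 := by
  rw [bestB_fold_eq (fun k => f (N - 1 - k)) g N]
  have hcongr : (List.range N).foldl (fun r k => max r (f (N - 1 - k) + mz g k)) 0
      = (List.range N).foldl
          (fun r k => max r ((fun i => f i + mz g (N - 1 - i)) (N - 1 - k))) 0 := by
    apply PySem.List.foldl_congr_mem
    intro acc k hk
    have hkN : k < N := List.mem_range.mp hk
    have : N - 1 - (N - 1 - k) = k := by omega
    simp only [this]
  rw [hcongr, foldl_max_reindex (fun i => f i + mz g (N - 1 - i)) N 0]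

-- ===== data lemmas: scanB's two lists are the two projections of mkA =====

def stepA (st : List (Int × Int × Int) × Int) (p : (Int × Int) × Nat) :
    List (Int × Int × Int) × Int :=
  let t := st.2 + p.1.2
  (st.1 ++ [(t - p.1.1, p.1.1, (p.2 : Int))], t)

def stepB (st : Int × List Int × List Int) (p : Int × Int) :
    Int × List Int × List Int :=
  let t := st.1 + p.2
  (t, st.2.1 ++ [t - p.1], st.2.2 ++ [t - 2 * p.1])

theorem mkA_eq (xs : List (Int × Int)) :
    mkA xs = ((xs.zipIdx).foldl stepA ([], 0)).1 := rfl

theorem scanB_eq (xs : List (Int × Int)) :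
    scanB xs = ((xs.foldl stepB (0, [], [])).2.1, (xs.foldl stepB (0, [], [])).2.2) := rfl

theorem scan_state :
    ∀ (xs : List (Int × Int)) (n : Nat) (t : Int) (acc : List (Int × Int × Int)),
      xs.foldl stepB (t, acc.map (fun q => q.1), acc.map (fun q => q.1 - q.2.1))
        = (((xs.zipIdx n).foldl stepA (acc, t)).2,
           ((xs.zipIdx n).foldl stepA (acc, t)).1.map (fun q => q.1),
           ((xs.zipIdx n).foldl stepA (acc, t)).1.map (fun q => q.1 - q.2.1)) := by
  intro xs
  induction xs with
  | nil => intro n t acc; rfl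
  | cons p rest ih =>
      intro n t acc
      rw [List.zipIdx_cons]
      simp only [List.foldl_cons]
      have hA : stepA (acc, t) (p, n)
          = (acc ++ [(t + p.2 - p.1, p.1, (n : Int))], t + p.2) := rfl
      have hB : stepB (t, acc.map (fun q => q.1), acc.map (fun q => q.1 - q.2.1)) p
          = (t + p.2,
             (acc ++ [(t + p.2 - p.1, p.1, (n : Int))]).map (fun q => q.1),
             (acc ++ [(t + p.2 - p.1, p.1, (n : Int))]).map (fun q => q.1 - q.2.1)) := by
        simp [stepB]
        omega
      rw [hA, hB, ih (n + 1) (t + p.2) (acc ++ [(t + p.2 - p.1, p.1, (n : Int))])]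

theorem scanB_fst (xs : List (Int × Int)) :
    (scanB xs).1 = (mkA xs).map (fun q => q.1) := by
  rw [scanB_eq, mkA_eq]
  have := scan_state xs 0 0 []
  simp only [List.map_nil] at this
  rw [this]

theorem scanB_snd (xs : List (Int × Int)) :
    (scanB xs).2 = (mkA xs).map (fun q => q.1 - q.2.1) := by
  rw [scanB_eq, mkA_eq]
  have := scan_state xs 0 0 []
  simp only [List.map_nil] at this
  rw [this]

-- getD through a map that sends the default (0,0,0) to 0
theorem getD_map_zero (F : Int × Int × Int → Int) (hF : F (0, 0, 0) = 0)
    (l : List (Int × Int × Int)) (i : Nat) :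
    (l.map F).getD i 0 = F (l.getD i (0, 0, 0)) := by
  by_cases h : i < l.length
  · rw [List.getD_eq_getElem _ _ (by simpa using h), List.getD_eq_getElem _ _ h]
    simp
  · rw [List.getD_eq_default _ _ (by simpa using h), List.getD_eq_default _ _ (by omega)]
    exact hF.symm

-- outer_eq with the inner body in A's literal shape 'r0 + a j - b j'
theorem outer_eq' (f a b : Nat → Int) (N : Nat) (acc : Int) :
    (List.range N).foldl
        (fun res i =>
          (List.range (N - i - 1)).foldl
            (fun res j => max res (f i + a j - b j)) (max res (f i))) acc
      = (List.range N).foldl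
          (fun res i => max res (f i + mz (fun j => a j - b j) (N - 1 - i))) acc := by
  have hshape : (fun (res : Int) (i : Nat) =>
      (List.range (N - i - 1)).foldl
        (fun res j => max res (f i + a j - b j)) (max res (f i)))
      = fun res i =>
      (List.range (N - i - 1)).foldl
        (fun res j => max res (f i + (a j - b j))) (max res (f i)) := by
    funext res i
    congr 1
    funext r j
    rw [add_sub_assoc]
  rw [hshape, outer_eq f (fun j => a j - b j) N acc]

theorem bestB_closed (N : Nat) (a d : List Int) :
    bestB N a d
      = (List.range N).foldl
          (fun res i => max res (a.getD i 0 + mz (fun j => d.getD j 0) (N - 1 - i))) 0 := by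
  unfold bestB
  exact bestB_eq (fun i => a.getD i 0) (fun j => d.getD j 0) N

-- the heart: A's two double loops equal the max of B's two linear passes
theorem main_core (ts1 ts2 : List (Int × Int × Int)) (N : Nat) :
    (List.range N).foldl
        (fun result i =>
          (List.range (N - i - 1)).foldl
            (fun result j =>
              max result ((ts2.getD i (0, 0, 0)).1 + (ts1.getD j (0, 0, 0)).1 - (ts1.getD j (0, 0, 0)).2.1))
            (max result (ts2.getD i (0, 0, 0)).1))
        ((List.range N).foldl
          (fun result i =>
            (List.range (N - i - 1)).foldl
              (fun result j =>
                max result ((ts1.getD i (0, 0, 0)).1 + (ts2.getD j (0, 0, 0)).1 - (ts2.getD j (0, 0, 0)).2.1))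
              (max result (ts1.getD i (0, 0, 0)).1))
          0)
      = max (bestB N (ts1.map (fun q => q.1)) (ts2.map (fun q => q.1 - q.2.1)))
            (bestB N (ts2.map (fun q => q.1)) (ts1.map (fun q => q.1 - q.2.1))) := by
  rw [outer_eq' (fun i => (ts1.getD i (0, 0, 0)).1)
        (fun j => (ts2.getD j (0, 0, 0)).1) (fun j => (ts2.getD j (0, 0, 0)).2.1) N 0]
  rw [outer_eq' (fun i => (ts2.getD i (0, 0, 0)).1)
        (fun j => (ts1.getD j (0, 0, 0)).1) (fun j => (ts1.getD j (0, 0, 0)).2.1) N]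
  rw [foldl_max_init_zero
        (fun i => (ts2.getD i (0, 0, 0)).1
          + mz (fun j => (ts1.getD j (0, 0, 0)).1 - (ts1.getD j (0, 0, 0)).2.1) (N - 1 - i))
        (List.range N) _
        (foldl_max_nonneg _ _ 0 le_rfl)]
  rw [bestB_closed, bestB_closed]
  simp only [getD_map_zero (fun q => q.1) rfl,
    getD_map_zero (fun q => q.1 - q.2.1) (by norm_num)]

-- ===== VERDICT (by name: the statement is the Claim_ definition above) =====
theorem solve_spec : Claim_equal_solve := by
  intro C xv _
  show solve C xv = solve_alt C xv
  simp only [solve, solve_alt]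
  rw [scanB_fst, scanB_snd, scanB_fst, scanB_snd]
  generalize mkA xv = t1
  generalize mkA (List.map (fun p => (C - p.1, p.2)) xv.reverse) = t2
  generalize xv.length = n
  exact main_core t1 t2 n
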